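-- pv_equiv track=rewrite | github.com/JustyDev/University | Semester-5/Лингвистическое обеспечение (16)/Tasks/posta.py | subtract_from_first
-- ===== SOURCE A (Python) =====
-- def subtract_from_first(tape):
--     """Вычитание второго числа из первого с записью результата на месте первого числа."""
--     i = 0
--     while tape[i] == 'X':
--         i += 1
--     i += 1
--     while tape[i] == 'X':
--         j = 0
--         while tape[j] != 'X':
--             j += 1
--         tape[j] = ' '
--         tape[i] = ' '
--         i += 1
--     return tape
-- ===== SOURCE B (Python) =====
-- def subtract_from_first(tape):
--     """Measure both X-runs once, then rewrite the tape by slice assignment (mutates tape like A)."""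
--     n = len(tape)
--     a = 0
--     while a < n and tape[a] == 'X':
--         a += 1
--     b = 0
--     while a + 1 + b < n and tape[a + 1 + b] == 'X':
--         b += 1
--     k = min(a, b)
--     tape[:k] = [' '] * k
--     tape[a + 1:a + 1 + b] = [' '] * b
--     return tape
-- ===== Notes on version B (the rewrite author's own statement) =====
-- stated objective: alternative
-- what changed: B measures the leading X-run and the X-run after the separator in one left-to-right pass and rewrites the tape with slice assignment, instead of A's rescan from index 0 for the leftmost X on every single subtraction step (the rescans only cost when the X-runs are long, which random tapes rarely have).
-- outside the precondition, e.g. on subtract_from_first(['X']): A raises IndexError, B returns ['X']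
import Mathlib
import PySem

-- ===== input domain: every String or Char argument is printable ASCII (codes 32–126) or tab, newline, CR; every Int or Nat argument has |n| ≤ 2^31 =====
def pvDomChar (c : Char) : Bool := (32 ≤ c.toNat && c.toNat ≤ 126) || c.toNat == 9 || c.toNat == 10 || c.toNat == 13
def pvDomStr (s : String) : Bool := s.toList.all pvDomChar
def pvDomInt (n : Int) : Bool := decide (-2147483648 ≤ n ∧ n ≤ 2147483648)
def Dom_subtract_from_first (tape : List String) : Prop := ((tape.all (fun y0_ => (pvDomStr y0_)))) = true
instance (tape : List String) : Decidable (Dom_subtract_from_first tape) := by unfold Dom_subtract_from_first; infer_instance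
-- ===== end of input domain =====

-- B measures the two X-runs once and rewrites the tape directly, instead of A's rescan from index 0
-- for the leftmost X at every subtraction step (objective: alternative); the equivalence proved is
-- about the RETURN value (both Pythons also mutate `tape` in place to that same value).

-- ===== PORT A =====
-- while tape[i] == 'X': i += 1   (fuel = tape.length; Pre_ keeps every read of A in range)
def pvFindNonX (tape : List String) (i : Nat) : Nat → Nat
  | 0 => i
  | fuel+1 => if tape.getD i "" = "X" then pvFindNonX tape (i+1) fuel else i

-- while tape[j] != 'X': j += 1
def pvFindX (tape : List String) (j : Nat) : Nat → Nat
  | 0 => j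
  | fuel+1 => if tape.getD j "" ≠ "X" then pvFindX tape (j+1) fuel else j

-- while tape[i] == 'X': j := leftmost X; tape[j] = ' '; tape[i] = ' '; i += 1
def pvMainLoop (tape : List String) (i : Nat) : Nat → List String
  | 0 => tape
  | fuel+1 =>
    if tape.getD i "" = "X" then
      let j := pvFindX tape 0 tape.length
      pvMainLoop ((tape.set j " ").set i " ") (i+1) fuel
    else tape

def subtract_from_first (tape : List String) : List String :=
  let i := pvFindNonX tape 0 tape.length
  pvMainLoop tape (i + 1) tape.length

-- ===== PORT B =====
-- while idx < n and tape[idx] == 'X': idx += 1   (returns the length of the X-run at idx)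
def pvRunLen (tape : List String) (idx : Nat) : Nat → Nat
  | 0 => 0
  | fuel+1 => if idx < tape.length ∧ tape.getD idx "" = "X" then pvRunLen tape (idx+1) fuel + 1 else 0

def subtract_from_first_alt (tape : List String) : List String :=
  let n := tape.length
  let a := pvRunLen tape 0 n
  let b := pvRunLen tape (a + 1) n
  let k := min a b
  -- tape[:k] = [' '] * k;  tape[a+1:a+1+b] = [' '] * b
  List.replicate k " " ++ (tape.drop k).take (a + 1 - k) ++ List.replicate b " " ++ tape.drop (a + 1 + b)

-- ===== PRECONDITION & SPEC =====
-- A raises IndexError iff the tape has no non-'X' cell, or no cell after the 'X'-run that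
-- follows the first non-'X' cell; Pre_ excludes exactly those inputs.
def Pre_subtract_from_first (tape : List String) : Prop :=
  tape.dropWhile (· == "X") ≠ [] ∧
    ((tape.dropWhile (· == "X")).tail).dropWhile (· == "X") ≠ []
instance (tape : List String) : Decidable (Pre_subtract_from_first tape) := by
  unfold Pre_subtract_from_first; infer_instance

def pvWitness_subtract_from_first : List String := ["X", " ", "X", " "]

def Spec_subtract_from_first (tape : List String) (out : List String) : Prop := out = subtract_from_first_alt tape
instance (tape : List String) (out : List String) : Decidable (Spec_subtract_from_first tape out) := by unfold Spec_subtract_from_first; infer_instance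

-- ===== CLAIM (what is proved, stated in full; the proofs are below) =====
def Claim_equal_subtract_from_first : Prop := ∀ (tape : List String), Dom_subtract_from_first tape → Pre_subtract_from_first tape → Spec_subtract_from_first tape (subtract_from_first tape)

-- ===== LEMMAS AND PROOFS =====

-- the tape after m subtraction steps: a, b = the lengths of the two 'X'-runs,
-- s, u = the two cells that delimit them (both ≠ "X"), r = the rest of the tape
def tapeM (a b m : Nat) (s u : String) (r : List String) : List String :=
  List.replicate (min m a) " " ++ List.replicate (a - m) "X" ++
    s :: (List.replicate m " " ++ List.replicate (b - m) "X" ++ u :: r)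

lemma tapeM_length (a b m : Nat) (s u : String) (r : List String) (hm : m ≤ b) :
    (tapeM a b m s u r).length = a + 1 + b + 1 + r.length := by
  simp [tapeM]; omega

lemma getD_tapeM (a b m : Nat) (s u : String) (r : List String) (hm : m ≤ b) (i : Nat) :
    (tapeM a b m s u r).getD i "" =
      if i < min m a then " "
      else if i < a then "X"
      else if i = a then s
      else if i < a + 1 + m then " "
      else if i < a + 1 + b then "X"
      else if i = a + 1 + b then u
      else r.getD (i - (a + 1 + b + 1)) "" := by
  unfold tapeM
  simp only [List.append_assoc]
  rcases Nat.lt_or_ge i (min m a) with h1 | h1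
  · rw [List.getD_append _ _ _ _ (by simpa using h1), List.getD_replicate _ (by simpa using h1)]
    split_ifs <;> first | rfl | omega
  · rw [List.getD_append_right _ _ _ _ (by simpa using h1)]
    simp only [List.length_replicate]
    rcases Nat.lt_or_ge i a with h2 | h2
    · rw [List.getD_append _ _ _ _ (by first | (simp only [List.length_replicate]; omega) | omega),
        List.getD_replicate _ (by first | (simp only [List.length_replicate]; omega) | omega)]
      split_ifs <;> first | rfl | omega
    · rw [List.getD_append_right _ _ _ _ (by first | (simp only [List.length_replicate]; omega) | omega)]
      simp only [List.length_replicate]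
      rcases Nat.eq_or_lt_of_le h2 with h3 | h3
      · rw [show i - min m a - (a - m) = 0 from by omega, List.getD_cons_zero]
        split_ifs <;> first | rfl | omega
      · rw [show i - min m a - (a - m) = (i - a - 1) + 1 from by omega, List.getD_cons_succ]
        rcases Nat.lt_or_ge i (a + 1 + m) with h4 | h4
        · rw [List.getD_append _ _ _ _ (by first | (simp only [List.length_replicate]; omega) | omega),
            List.getD_replicate _ (by first | (simp only [List.length_replicate]; omega) | omega)]
          split_ifs <;> first | rfl | omega
        · rw [List.getD_append_right _ _ _ _ (by first | (simp only [List.length_replicate]; omega) | omega)]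
          simp only [List.length_replicate]
          rcases Nat.lt_or_ge i (a + 1 + b) with h5 | h5
          · rw [List.getD_append _ _ _ _ (by first | (simp only [List.length_replicate]; omega) | omega),
              List.getD_replicate _ (by first | (simp only [List.length_replicate]; omega) | omega)]
            split_ifs <;> first | rfl | omega
          · rw [List.getD_append_right _ _ _ _ (by first | (simp only [List.length_replicate]; omega) | omega)]
            simp only [List.length_replicate]
            rcases Nat.eq_or_lt_of_le h5 with h6 | h6
            · rw [show i - a - 1 - m - (b - m) = 0 from by omega, List.getD_cons_zero]
              split_ifs <;> first | rfl | omega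
            · rw [show i - a - 1 - m - (b - m) = (i - (a + 1 + b + 1)) + 1 from by omega,
                List.getD_cons_succ]
              split_ifs <;> first | rfl | omega

lemma pvFindNonX_eq (t : List String) (p : Nat)
    (hX : ∀ k, k < p → t.getD k "" = "X") (hp : t.getD p "" ≠ "X") :
    ∀ fuel q, q ≤ p → p + 1 ≤ q + fuel → pvFindNonX t q fuel = p := by
  intro fuel
  induction fuel with
  | zero => intro q h1 h2; omega
  | succ fuel ih =>
    intro q h1 h2
    rcases Nat.lt_or_ge q p with h | h
    · rw [pvFindNonX, if_pos (hX q h)]; exact ih (q+1) h (by omega)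
    · have : q = p := by omega
      subst this
      rw [pvFindNonX, if_neg hp]

lemma pvFindX_eq (t : List String) (p : Nat)
    (hN : ∀ k, k < p → t.getD k "" ≠ "X") (hp : t.getD p "" = "X") :
    ∀ fuel q, q ≤ p → p + 1 ≤ q + fuel → pvFindX t q fuel = p := by
  intro fuel
  induction fuel with
  | zero => intro q h1 h2; omega
  | succ fuel ih =>
    intro q h1 h2
    rcases Nat.lt_or_ge q p with h | h
    · rw [pvFindX, if_pos (hN q h)]; exact ih (q+1) h (by omega)
    · have : q = p := by omega
      subst this
      rw [pvFindX, if_neg (by simpa using hp)]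

lemma pvRunLen_eq (t : List String) (p : Nat) (hp : p ≤ t.length)
    (hstop : p = t.length ∨ t.getD p "" ≠ "X") :
    ∀ fuel q, q ≤ p → p ≤ q + fuel → (∀ k, q ≤ k → k < p → t.getD k "" = "X") →
      pvRunLen t q fuel = p - q := by
  intro fuel
  induction fuel with
  | zero => intro q h1 h2 hX; rw [pvRunLen]; omega
  | succ fuel ih =>
    intro q h1 h2 hX
    rcases Nat.lt_or_ge q p with h | h
    · rw [pvRunLen, if_pos ⟨by omega, hX q (le_refl q) h⟩,
        ih (q+1) h (by omega) (fun k hk1 hk2 => hX k (by omega) hk2)]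
      omega
    · have hq : q = p := by omega
      subst hq
      rw [pvRunLen, if_neg]
      · omega
      · rcases hstop with h | h
        · intro hc; omega
        · intro hc; exact h hc.2

lemma set_step_lt (a b m : Nat) (s u : String) (r : List String)
    (hma : m < a) (hmb : m < b) :
    ((tapeM a b m s u r).set m " ").set (a + 1 + m) " " = tapeM a b (m + 1) s u r := by
  have hm1 : m ≤ b := le_of_lt hmb
  have hm2 : m + 1 ≤ b := hmb
  apply List.ext_getElem
  · simp [List.length_set, tapeM_length a b m s u r hm1, tapeM_length a b (m+1) s u r hm2]
  · intro i hL hR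
    simp only [List.getElem_set]
    have h1 : i < (tapeM a b m s u r).length := by simpa using hL
    have h2 : i < (tapeM a b (m+1) s u r).length := by simpa using hR
    rw [← List.getD_eq_getElem (tapeM a b m s u r) "" h1, ← List.getD_eq_getElem _ "" h2,
      getD_tapeM a b m s u r hm1, getD_tapeM a b (m+1) s u r hm2]
    split_ifs <;> first | rfl | omega

lemma set_step_ge (a b m : Nat) (s u : String) (r : List String)
    (hma : a ≤ m) (hmb : m < b) :
    ((tapeM a b m s u r).set (a + 1 + m) " ").set (a + 1 + m) " " = tapeM a b (m + 1) s u r := by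
  have hm1 : m ≤ b := le_of_lt hmb
  have hm2 : m + 1 ≤ b := hmb
  apply List.ext_getElem
  · simp [List.length_set, tapeM_length a b m s u r hm1, tapeM_length a b (m+1) s u r hm2]
  · intro i hL hR
    simp only [List.getElem_set]
    have h1 : i < (tapeM a b m s u r).length := by simpa using hL
    have h2 : i < (tapeM a b (m+1) s u r).length := by simpa using hR
    rw [← List.getD_eq_getElem (tapeM a b m s u r) "" h1, ← List.getD_eq_getElem _ "" h2,
      getD_tapeM a b m s u r hm1, getD_tapeM a b (m+1) s u r hm2]
    split_ifs <;> first | rfl | omega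

lemma pvMainLoop_eq (a b : Nat) (s u : String) (r : List String)
    (hs : s ≠ "X") (hu : u ≠ "X") :
    ∀ fuel m, m ≤ b → b + 1 ≤ m + fuel →
      pvMainLoop (tapeM a b m s u r) (a + 1 + m) fuel = tapeM a b b s u r := by
  intro fuel
  induction fuel with
  | zero => intro m h1 h2; omega
  | succ fuel ih =>
    intro m h1 h2
    have hlen := tapeM_length a b m s u r h1
    rcases Nat.lt_or_ge m b with h | h
    · rw [pvMainLoop]
      have hget : (tapeM a b m s u r).getD (a+1+m) "" = "X" := by
        rw [getD_tapeM a b m s u r h1]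
        split_ifs <;> first | rfl | omega
      rw [if_pos hget]
      rcases Nat.lt_or_ge m a with hma | hma
      · have hj : pvFindX (tapeM a b m s u r) 0 (tapeM a b m s u r).length = m := by
          apply pvFindX_eq
          · intro k hk
            rw [getD_tapeM a b m s u r h1]
            split_ifs <;> first | omega | decide
          · rw [getD_tapeM a b m s u r h1]
            split_ifs <;> first | rfl | omega
          · omega
          · omega
        rw [hj]
        show pvMainLoop (((tapeM a b m s u r).set m " ").set (a + 1 + m) " ") (a + 1 + m + 1) fuel
          = tapeM a b b s u r
        rw [set_step_lt a b m s u r hma h]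
        have hrec := ih (m+1) (by omega) (by omega)
        rw [show a + 1 + (m + 1) = a + 1 + m + 1 from by omega] at hrec
        exact hrec
      · have hj : pvFindX (tapeM a b m s u r) 0 (tapeM a b m s u r).length = a + 1 + m := by
          apply pvFindX_eq
          · intro k hk
            rw [getD_tapeM a b m s u r h1]
            split_ifs <;> first | omega | exact hs | decide
          · rw [getD_tapeM a b m s u r h1]
            split_ifs <;> first | rfl | omega
          · omega
          · omega
        rw [hj]
        show pvMainLoop (((tapeM a b m s u r).set (a + 1 + m) " ").set (a + 1 + m) " ") (a + 1 + m + 1) fuel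
          = tapeM a b b s u r
        rw [set_step_ge a b m s u r hma h]
        have hrec := ih (m+1) (by omega) (by omega)
        rw [show a + 1 + (m + 1) = a + 1 + m + 1 from by omega] at hrec
        exact hrec
    · have hm : m = b := by omega
      rw [pvMainLoop, if_neg]
      · rw [hm]
      · rw [getD_tapeM a b m s u r h1]
        split_ifs <;> first | omega | exact hs | exact hu | decide

lemma replicate_of_all_X (l : List String) (h : ∀ x ∈ l, x = "X") :
    l = List.replicate l.length "X" :=
  List.eq_replicate_iff.mpr ⟨rfl, h⟩

lemma decomp_of_pre (tape : List String)
    (h1 : tape.dropWhile (· == "X") ≠ [])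
    (h2 : ((tape.dropWhile (· == "X")).tail).dropWhile (· == "X") ≠ []) :
    ∃ (a b : Nat) (s u : String) (r : List String), s ≠ "X" ∧ u ≠ "X" ∧
      tape = tapeM a b 0 s u r := by
  obtain ⟨s, t, hst⟩ : ∃ s t, tape.dropWhile (· == "X") = s :: t :=
    List.exists_cons_of_ne_nil h1
  have hs : s ≠ "X" := by
    have h := List.head?_dropWhile_not (· == "X") (l := tape)
    rw [hst] at h
    simpa using h
  rw [hst] at h2
  obtain ⟨u, r, hur⟩ : ∃ u r, t.dropWhile (· == "X") = u :: r :=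
    List.exists_cons_of_ne_nil (by simpa using h2)
  have hu : u ≠ "X" := by
    have h := List.head?_dropWhile_not (· == "X") (l := t)
    rw [hur] at h
    simpa using h
  refine ⟨(tape.takeWhile (· == "X")).length, (t.takeWhile (· == "X")).length, s, u, r, hs, hu, ?_⟩
  have e1 : tape.takeWhile (· == "X") = List.replicate (tape.takeWhile (· == "X")).length "X" := by
    apply replicate_of_all_X
    intro x hx
    simpa using List.mem_takeWhile_imp hx
  have e2 : t.takeWhile (· == "X") = List.replicate (t.takeWhile (· == "X")).length "X" := by
    apply replicate_of_all_X
    intro x hx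
    simpa using List.mem_takeWhile_imp hx
  have hw := List.takeWhile_append_dropWhile (p := (· == "X")) (l := tape)
  have ht := List.takeWhile_append_dropWhile (p := (· == "X")) (l := t)
  have htt : t = t.takeWhile (· == "X") ++ u :: r := by
    conv_lhs => rw [← ht, hur]
  have hkey : tape = tape.takeWhile (· == "X") ++ s :: (t.takeWhile (· == "X") ++ u :: r) := by
    conv_lhs => rw [← hw, hst, htt]
  simp only [tapeM, Nat.zero_min, Nat.sub_zero, List.replicate_zero, List.nil_append]
  calc tape = tape.takeWhile (· == "X") ++ s :: (t.takeWhile (· == "X") ++ u :: r) := hkey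
    _ = List.replicate (tape.takeWhile (· == "X")).length "X" ++
          s :: (List.replicate (t.takeWhile (· == "X")).length "X" ++ u :: r) := by
        rw [← e1, ← e2]

lemma alt_eq (a b : Nat) (s u : String) (r : List String)
    (hs : s ≠ "X") (hu : u ≠ "X") :
    subtract_from_first_alt (tapeM a b 0 s u r) = tapeM a b b s u r := by
  have hlen := tapeM_length a b 0 s u r (Nat.zero_le b)
  have ha : pvRunLen (tapeM a b 0 s u r) 0 (tapeM a b 0 s u r).length = a := by
    have := pvRunLen_eq (tapeM a b 0 s u r) a (by omega)
      (Or.inr (by rw [getD_tapeM a b 0 s u r (Nat.zero_le b)]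
                  split_ifs <;> first | exact hs | omega))
      (tapeM a b 0 s u r).length 0 (Nat.zero_le a) (by omega)
      (by intro k hk1 hk2
          rw [getD_tapeM a b 0 s u r (Nat.zero_le b)]
          split_ifs <;> first | rfl | omega)
    simpa using this
  have hb : pvRunLen (tapeM a b 0 s u r) (a + 1) (tapeM a b 0 s u r).length = b := by
    have := pvRunLen_eq (tapeM a b 0 s u r) (a + 1 + b) (by omega)
      (Or.inr (by rw [getD_tapeM a b 0 s u r (Nat.zero_le b)]
                  split_ifs <;> first | exact hu | omega))
      (tapeM a b 0 s u r).length (a+1) (by omega) (by omega)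
      (by intro k hk1 hk2
          rw [getD_tapeM a b 0 s u r (Nat.zero_le b)]
          split_ifs <;> first | rfl | omega)
    rw [this]
    omega
  simp only [subtract_from_first_alt]
  rw [ha, hb]
  have hk : min a b ≤ a := Nat.min_le_left a b
  have htape0 : tapeM a b 0 s u r
      = List.replicate a "X" ++ s :: (List.replicate b "X" ++ u :: r) := by
    simp [tapeM]
  rw [htape0]
  rw [List.drop_append, List.drop_replicate, List.length_replicate,
    show min a b - a = 0 from by omega, List.drop_zero]
  rw [List.take_append, List.take_replicate, List.length_replicate,
    show min (a + 1 - min a b) (a - min a b) = a - min a b from by omega,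
    show a + 1 - min a b - (a - min a b) = 1 from by omega,
    show (1 : Nat) = 0 + 1 from rfl, List.take_succ_cons, List.take_zero]
  rw [List.drop_append, List.drop_replicate, List.length_replicate,
    show a - (a + 1 + b) = 0 from by omega, List.replicate_zero,
    show a + 1 + b - a = b + 1 from by omega, List.drop_succ_cons,
    List.drop_append, List.drop_replicate, List.length_replicate,
    show b - b = 0 from by omega, List.replicate_zero, List.drop_zero]
  simp only [tapeM, Nat.sub_self, List.replicate_zero, List.nil_append, List.append_nil]
  rw [show min b a = min a b from Nat.min_comm b a, show a - b = a - min a b from by omega]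
  simp [List.append_assoc]

-- ===== VERDICT (by name: the statement is the Claim_ definition above) =====
theorem subtract_from_first_spec : Claim_equal_subtract_from_first := by
  intro tape _ hpre
  unfold Spec_subtract_from_first
  obtain ⟨a, b, s, u, r, hs, hu, ht⟩ := decomp_of_pre tape hpre.1 hpre.2
  subst ht
  rw [alt_eq a b s u r hs hu]
  unfold subtract_from_first
  have hlen := tapeM_length a b 0 s u r (Nat.zero_le b)
  have hfind : pvFindNonX (tapeM a b 0 s u r) 0 (tapeM a b 0 s u r).length = a := by
    apply pvFindNonX_eq
    · intro k hk
      rw [getD_tapeM a b 0 s u r (Nat.zero_le b)]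
      split_ifs <;> first | rfl | omega
    · rw [getD_tapeM a b 0 s u r (Nat.zero_le b)]
      split_ifs <;> first | exact hs | omega
    · exact Nat.zero_le a
    · omega
  rw [hfind]
  have hmain := pvMainLoop_eq a b s u r hs hu (tapeM a b 0 s u r).length 0 (Nat.zero_le b) (by omega)
  simpa using hmain
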